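-- pv_equiv track=rewrite | github.com/Fernando7492/knn-cancer-detection | src/MeuKnn.py | _votar
-- ===== SOURCE A (Python) =====
-- def _votar(vizinhos_labels,vizinhos_distancias=None):
--
--     votos = {}
--     for labels in vizinhos_labels:
--         if labels in votos:
--             votos[labels] += 1
--         else:
--             votos[labels] = 1
--
--     #mais_votado = None
--     #maior_contagem = -1
--     #for label,cont in votos.items():
--     #    if cont > maior_contagem:
--     #        maior_contagem = cont
--     #        mais_votado = label
--
--     max_votos = max(votos.values())
--     candidatos = [label for label,cont in votos.items() if cont == max_votos]
--     mais_votado = max(candidatos)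
--
--     return mais_votado
-- ===== SOURCE B (Python) =====
-- def _votar(vizinhos_labels, vizinhos_distancias=None):
--     if not vizinhos_labels:
--         raise ValueError("max() arg is an empty sequence")
--     ordered = sorted(vizinhos_labels)
--     prev = ordered[0]
--     run = 1
--     best_label = ordered[0]
--     best_count = 1
--     for x in ordered[1:]:
--         if x == prev:
--             run += 1
--         else:
--             run = 1
--         prev = x
--         if run >= best_count:
--             best_count = run
--             best_label = x
--     return best_label
-- ===== Notes on version B (the rewrite author's own statement) =====
-- stated objective: alternative
-- what changed: Replaces the dict-of-counts plus two max() passes by sort-then-scan: sort the labels ascending and count consecutive runs in one pass, updating the best label on >= so the largest label wins ties exactly as max(candidatos) does.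
import Mathlib
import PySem

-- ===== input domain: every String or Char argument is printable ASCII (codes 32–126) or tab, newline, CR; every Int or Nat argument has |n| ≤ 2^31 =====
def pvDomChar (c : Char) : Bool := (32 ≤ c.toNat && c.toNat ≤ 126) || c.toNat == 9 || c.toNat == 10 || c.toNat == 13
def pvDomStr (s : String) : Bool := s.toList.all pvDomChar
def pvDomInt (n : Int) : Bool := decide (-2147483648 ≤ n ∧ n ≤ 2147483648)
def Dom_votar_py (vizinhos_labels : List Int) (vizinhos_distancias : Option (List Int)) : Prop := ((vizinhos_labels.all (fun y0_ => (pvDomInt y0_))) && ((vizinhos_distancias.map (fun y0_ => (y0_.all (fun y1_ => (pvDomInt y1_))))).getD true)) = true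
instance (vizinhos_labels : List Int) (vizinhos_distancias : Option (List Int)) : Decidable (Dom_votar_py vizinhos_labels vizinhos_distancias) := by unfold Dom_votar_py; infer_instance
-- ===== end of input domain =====

-- B replaces the dict-of-counts + two max() passes by sort-then-scan over runs (alternative
-- decomposition, same results incl. the largest-label tie-break); equivalence is about the
-- return value; both raise ValueError on [] (excluded by Pre_).

-- ===== PORT A =====
def votar_py (vizinhos_labels : List Int) (vizinhos_distancias : Option (List Int)) : Int :=
  -- votos = {}; for labels in vizinhos_labels: …
  let votos : PySem.Dict Int Int := vizinhos_labels.foldl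
    (fun d labels =>
      if d.contains labels then d.insert labels (d.getD labels 0 + 1)  -- votos[labels] += 1 (key present)
      else d.insert labels 1) PySem.Dict.empty
  -- max_votos = max(votos.values())  — max() raises ValueError on empty, excluded by Pre_
  match PySem.List.max? votos.values (fun v => v) with
  | none => 0  -- unreachable under Pre_votar_py
  | some max_votos =>
    let candidatos := (votos.items.filter (fun p => p.2 == max_votos)).map (fun p => p.1)
    match PySem.List.max? candidatos (fun v => v) with
    | none => 0  -- unreachable: candidatos contains the label realising max_votos
    | some mais_votado => mais_votado

-- ===== PORT B =====
-- the scan over ordered[1:] : state (prev, run, best_label, best_count)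
def votarScan : List Int → Int → Int → Int → Int → Int
  | [], _, _, best_label, _ => best_label
  | x :: rest, prev, run, best_label, best_count =>
    let run' := if x = prev then run + 1 else 1
    if best_count ≤ run' then votarScan rest x run' x run'
    else votarScan rest x run' best_label best_count

def votar_py_alt (vizinhos_labels : List Int) (vizinhos_distancias : Option (List Int)) : Int :=
  match PySem.List.sorted vizinhos_labels (fun v => v) false with
  | [] => 0  -- Python B raises ValueError here (excluded by Pre_)
  | h :: t => votarScan t h 1 h 1

-- ===== PRECONDITION & SPEC =====
-- Pre_ excludes only the empty label list, on which A's max() raises ValueError (B raises too).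
def Pre_votar_py (vizinhos_labels : List Int) (vizinhos_distancias : Option (List Int)) : Prop :=
  vizinhos_labels ≠ []
instance (vizinhos_labels : List Int) (vizinhos_distancias : Option (List Int)) : Decidable (Pre_votar_py vizinhos_labels vizinhos_distancias) := by unfold Pre_votar_py; infer_instance
def pvWitness_votar_py : List Int × Option (List Int) := ([1, 2, 2, 3], none)

def Spec_votar_py (vizinhos_labels : List Int) (vizinhos_distancias : Option (List Int)) (out : Int) : Prop := out = votar_py_alt vizinhos_labels vizinhos_distancias
instance (vizinhos_labels : List Int) (vizinhos_distancias : Option (List Int)) (out : Int) : Decidable (Spec_votar_py vizinhos_labels vizinhos_distancias out) := by unfold Spec_votar_py; infer_instance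

-- ===== CLAIM (what is proved, stated in full; the proofs are below) =====
def Claim_equal_votar_py : Prop := ∀ (vizinhos_labels : List Int) (vizinhos_distancias : Option (List Int)), Dom_votar_py vizinhos_labels vizinhos_distancias → Pre_votar_py vizinhos_labels vizinhos_distancias → Spec_votar_py vizinhos_labels vizinhos_distancias (votar_py vizinhos_labels vizinhos_distancias)

-- ===== LEMMAS AND PROOFS =====

-- the common characterisation: m is the largest label among those of maximal count
def IsBest (l : List Int) (m : Int) : Prop :=
  m ∈ l ∧ (∀ y ∈ l, l.count y ≤ l.count m) ∧ (∀ y ∈ l, l.count y = l.count m → y ≤ m)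

theorem IsBest_unique {l : List Int} {m m' : Int} (h : IsBest l m) (h' : IsBest l m') : m = m' := by
  obtain ⟨hm, hmax, htie⟩ := h
  obtain ⟨hm', hmax', htie'⟩ := h'
  have h1 : l.count m ≤ l.count m' := hmax' m hm
  have h2 : l.count m' ≤ l.count m := hmax m' hm'
  have := htie m' hm' (by omega)
  have := htie' m hm (by omega)
  omega

theorem IsBest_perm {l l' : List Int} {m : Int} (hp : l.Perm l') (h : IsBest l m) : IsBest l' m := by
  obtain ⟨hm, hmax, htie⟩ := h
  refine ⟨hp.mem_iff.mp hm, ?_, ?_⟩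
  · intro y hy
    rw [← hp.count_eq, ← hp.count_eq]
    exact hmax y (hp.mem_iff.mpr hy)
  · intro y hy hc
    rw [← hp.count_eq, ← hp.count_eq] at hc
    exact htie y (hp.mem_iff.mpr hy) hc

theorem A_foldl_eq_counter (xs : List Int) :
    xs.foldl (fun d labels => if d.contains labels then d.insert labels (d.getD labels 0 + 1)
      else d.insert labels (1:Int)) PySem.Dict.empty = PySem.Dict.counter xs := by
  rw [← PySem.Dict.foldl_insert_getD_add_one_eq_counter]
  congr 1
  funext d x
  by_cases h : d.contains x
  · simp [h]
  · simp [h, PySem.Dict.getD_of_not_contains d 0 (by simpa using h)]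

theorem A_isBest (xs : List Int) (d : Option (List Int)) (hne : xs ≠ []) :
    IsBest xs (votar_py xs d) := by
  unfold votar_py
  simp only [A_foldl_eq_counter]
  -- values of the counter
  have hitems := PySem.Dict.items_counter xs
  have hvals : (PySem.Dict.counter xs).values
      = (PySem.Set.ofList xs).map (fun k => ((xs.count k : Int))) := by
    simp [PySem.Dict.values, hitems, Function.comp]
  obtain ⟨x0, hx0⟩ := List.exists_mem_of_ne_nil xs hne
  have hx0S : x0 ∈ PySem.Set.ofList xs := (PySem.Set.mem_ofList xs x0).mpr hx0
  have hvne : (PySem.Dict.counter xs).values ≠ [] := by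
    rw [hvals]; exact List.ne_nil_of_mem (List.mem_map_of_mem hx0S)
  cases hM : PySem.List.max? (PySem.Dict.counter xs).values (fun v => v) with
  | none => exact absurd ((PySem.List.max?_eq_none_iff _ _).mp hM) hvne
  | some M =>
    dsimp only
    -- membership in candidatos
    have hcand : ∀ m : Int,
        m ∈ ((PySem.Dict.counter xs).items.filter (fun p => p.2 == M)).map (fun p => p.1)
        ↔ m ∈ xs ∧ (xs.count m : Int) = M := by
      intro m
      constructor
      · intro h
        obtain ⟨p, hp, rfl⟩ := List.mem_map.mp h
        obtain ⟨hpmem, hpb⟩ := List.mem_filter.mp hp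
        rw [hitems] at hpmem
        obtain ⟨k, hk, rfl⟩ := List.mem_map.mp hpmem
        exact ⟨(PySem.Set.mem_ofList xs k).mp hk, by simpa using hpb⟩
      · rintro ⟨hm, hc⟩
        refine List.mem_map.mpr ⟨(m, (xs.count m : Int)), List.mem_filter.mpr ⟨?_, by simpa using hc⟩, rfl⟩
        rw [hitems]; exact List.mem_map_of_mem ((PySem.Set.mem_ofList xs m).mpr hm)
    -- M is realised: max?_mem gives M ∈ values
    have hMmem := PySem.List.max?_mem hM
    rw [hvals] at hMmem
    obtain ⟨k0, hk0S, hk0⟩ := List.mem_map.mp hMmem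
    have hMmax : ∀ y ∈ xs, (xs.count y : Int) ≤ M := by
      intro y hy
      have : ((xs.count y : Int)) ∈ (PySem.Dict.counter xs).values := by
        rw [hvals]; exact List.mem_map_of_mem ((PySem.Set.mem_ofList xs y).mpr hy)
      simpa using PySem.List.max?_isMax hM _ this
    have hcne : ((PySem.Dict.counter xs).items.filter (fun p => p.2 == M)).map (fun p => p.1) ≠ [] := by
      apply List.ne_nil_of_mem ((hcand k0).mpr ⟨(PySem.Set.mem_ofList xs k0).mp hk0S, hk0⟩)
    cases hres : PySem.List.max? (((PySem.Dict.counter xs).items.filter (fun p => p.2 == M)).map (fun p => p.1)) (fun v => v) with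
    | none => exact absurd ((PySem.List.max?_eq_none_iff _ _).mp hres) hcne
    | some m =>
      dsimp only
      obtain ⟨hmx, hmc⟩ := (hcand m).mp (PySem.List.max?_mem hres)
      refine ⟨hmx, ?_, ?_⟩
      · intro y hy
        have := hMmax y hy
        omega
      · intro y hy hc
        have : y ∈ ((PySem.Dict.counter xs).items.filter (fun p => p.2 == M)).map (fun p => p.1) :=
          (hcand y).mpr ⟨hy, by rw [hc]; exact hmc⟩
        simpa using PySem.List.max?_isMax hres _ this

theorem le_getLast' {p : List Int} (hp : p.Pairwise (· ≤ ·)) {prev : Int}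
    (h : p.getLast? = some prev) : ∀ y ∈ p, y ≤ prev := by
  induction p with
  | nil => simp at h
  | cons a t ih =>
    cases t with
    | nil => simp at h; subst h; simp
    | cons b u =>
      have htl : (b :: u).getLast? = some prev := by
        rw [← h]; simp [List.getLast?_cons_cons]
      intro y hy
      rcases List.mem_cons.mp hy with rfl | hy'
      · exact le_trans (List.rel_of_pairwise_cons hp (List.mem_of_getLast? htl)) (le_refl _)
      · exact ih hp.of_cons htl y hy'

theorem scan_isBest : ∀ (rest p : List Int) (prev run bl bc : Int),
    (p ++ rest).Pairwise (· ≤ ·) →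
    p.getLast? = some prev →
    run = (p.count prev : Int) →
    bl ∈ p →
    bc = (p.count bl : Int) →
    (∀ y ∈ p, p.count y ≤ p.count bl) →
    (∀ y ∈ p, p.count y = p.count bl → y ≤ bl) →
    IsBest (p ++ rest) (votarScan rest prev run bl bc) := by
  intro rest
  induction rest with
  | nil =>
    intro p prev run bl bc hs hlast hrun hblm hbc hmax htie
    simpa [votarScan] using ⟨hblm, hmax, htie⟩
  | cons x rest ih =>
    intro p prev run bl bc hs hlast hrun hblm hbc hmax htie
    have hpp : p.Pairwise (· ≤ ·) := (List.pairwise_append.mp hs).1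
    have hxall : ∀ y ∈ p, y ≤ x :=
      fun y hy => (List.pairwise_append.mp hs).2.2 y hy x (List.mem_cons_self ..)
    have hprevm : prev ∈ p := List.mem_of_getLast? hlast
    have hple : ∀ y ∈ p, y ≤ prev := le_getLast' hpp hlast
    have hassoc : (p ++ [x]) ++ rest = p ++ x :: rest := by simp
    have hs' : ((p ++ [x]) ++ rest).Pairwise (· ≤ ·) := by rw [hassoc]; exact hs
    have hlast' : (p ++ [x]).getLast? = some x := by simp
    have hcq : ∀ y : Int, (p ++ [x]).count y = p.count y + (if y = x then 1 else 0) := by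
      intro y
      by_cases h : y = x
      · subst h; simp [List.count_append]
      · simp [List.count_append, h, Ne.symm h]
    have hxmemq : x ∈ p ++ [x] := by simp
    have hblmq : bl ∈ p ++ [x] := List.mem_append_left _ hblm
    simp only [votarScan]
    set r : Int := if x = prev then run + 1 else 1 with hr
    have hrun' : r = ((p ++ [x]).count x : Int) := by
      rw [hr]
      by_cases hxp : x = prev
      · subst hxp; rw [hcq]; simp [hrun]
      · have hxnot : x ∉ p := by
          intro hx
          exact hxp (le_antisymm (hple x hx) (hxall prev hprevm))
        rw [hcq]
        simp [hxp, List.count_eq_zero.mpr hxnot]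
    by_cases hbr : bc ≤ r
    · rw [if_pos hbr, ← hassoc]
      apply ih (p ++ [x]) x _ x _ hs' hlast' hrun' hxmemq hrun'
      · intro y hy
        rcases List.mem_append.mp hy with hy' | hy'
        · by_cases hyx : y = x
          · subst hyx; exact le_refl _
          · have h1 : p.count y ≤ p.count bl := hmax y hy'
            have hbcle : (p.count bl : Int) ≤ ((p ++ [x]).count x : Int) := by
              rw [← hbc, ← hrun']; exact hbr
            rw [hcq y]
            simp only [hyx, if_false]
            omega
        · simp at hy'; subst hy'; exact le_refl _
      · intro y hy _
        rcases List.mem_append.mp hy with hy' | hy'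
        · exact hxall y hy'
        · simp at hy'; omega
    · rw [if_neg hbr, ← hassoc]
      have hbrI : r < bc := by omega
      have hblx : bl ≠ x := by
        intro h
        have h2 : ((p ++ [x]).count x : Int) = (p.count x : Int) + 1 := by rw [hcq]; simp
        rw [← hrun', ← h] at h2
        omega
      have hcbl : (p ++ [x]).count bl = p.count bl := by rw [hcq]; simp [hblx]
      have hlt : ((p ++ [x]).count x : Int) < ((p ++ [x]).count bl : Int) := by
        rw [← hrun', hcbl, ← hbc]; exact hbrI
      apply ih (p ++ [x]) x _ bl _ hs' hlast' hrun' hblmq (by rw [hcbl]; exact hbc)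
      · intro y hy
        by_cases hyx : y = x
        · have := hlt; subst hyx; omega
        · have hy' : y ∈ p := by
            rcases List.mem_append.mp hy with h | h
            · exact h
            · simp at h; exact absurd h hyx
          rw [hcq y, hcbl]
          simp only [hyx, if_false]
          have := hmax y hy'
          omega
      · intro y hy hcy
        have hyx : y ≠ x := by
          intro h
          have := hlt; subst h; omega
        have hy' : y ∈ p := by
          rcases List.mem_append.mp hy with h | h
          · exact h
          · simp at h; exact absurd h hyx
        apply htie y hy'
        rw [hcq y, hcbl] at hcy
        simpa [hyx] using hcy

theorem B_isBest (xs : List Int) (d : Option (List Int)) (hne : xs ≠ []) :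
    IsBest xs (votar_py_alt xs d) := by
  unfold votar_py_alt
  cases hsort : PySem.List.sorted xs (fun v => v) false with
  | nil => exact absurd ((PySem.List.sorted_eq_nil_iff ..).mp hsort) hne
  | cons h t =>
    have hperm : (h :: t).Perm xs := hsort ▸ PySem.List.sorted_perm xs (fun v => v) false
    have hpw : (h :: t).Pairwise (· ≤ ·) := by
      have hp := PySem.List.sorted_pairwise xs (fun v => v)
      rw [hsort] at hp; simpa using hp
    have hscan := scan_isBest t [h] h 1 h 1 (by simpa using hpw) (by simp) (by simp)
      (by simp) (by simp) (by simp) (by simp)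
    exact IsBest_perm (by simpa using hperm) (by simpa using hscan)

-- ===== VERDICT (by name: the statement is the Claim_ definition above) =====
theorem votar_py_spec : Claim_equal_votar_py := by
  intro xs d _ hpre
  unfold Spec_votar_py
  exact IsBest_unique (A_isBest xs d hpre) (B_isBest xs d hpre)
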